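-- pv_equiv track=rewrite | github.com/CRS5226/stock_market_breakout_7 | ztest.py | _pick_base_from_list
-- ===== SOURCE A (Python) =====
-- def _is_dict(x):
--     return isinstance(x, dict)
--
-- def _pick_base_from_list(items, desired_stock_code: str | None):
--     """
--     Choose a 'base' dict from a list:
--       1) one with stock_code == desired_stock_code
--       2) else first having any stock_code / instrument_token
--       3) else a new empty dict
--     """
--     idx = None
--     if desired_stock_code:
--         for i, it in enumerate(items):
--             if (
--                 _is_dict(it)
--                 and str(it.get("stock_code", "")).upper()
--                 == str(desired_stock_code).upper()
--             ):
--                 idx = i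
--                 break
--     if idx is None:
--         for i, it in enumerate(items):
--             if _is_dict(it) and ("stock_code" in it or "instrument_token" in it):
--                 idx = i
--                 break
--     if idx is None:
--         return {}, list(range(len(items)))  # nothing suitable, merge all into empty
--     rest = [i for i in range(len(items)) if i != idx]
--     return items[idx].copy(), rest
-- ===== SOURCE B (Python) =====
-- def _pick_base_from_list(items, desired_stock_code):
--     # One fold over enumerate(items), no break and no second scan: keep the FIRST
--     # exact-match index and the FIRST fallback index together; index lists are
--     # built from enumerate rather than range().
--     want = str(desired_stock_code).upper() if desired_stock_code else None
--     exact, fallback = None, None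
--     for j, it in enumerate(items):
--         if exact is None and want is not None and isinstance(it, dict) \
--                 and str(it.get("stock_code", "")).upper() == want:
--             exact = j
--         if fallback is None and isinstance(it, dict) \
--                 and ("stock_code" in it or "instrument_token" in it):
--             fallback = j
--     idx = fallback if exact is None else exact
--     if idx is None:
--         return {}, [j for j, _ in enumerate(items)]
--     return dict(items[idx]), [j for j, _ in enumerate(items) if j != idx]
-- ===== Notes on version B (the rewrite author's own statement) =====
-- stated objective: alternative
-- what changed: Replaces A's two staged early-exit scans (exact-match scan, then a second full fallback scan) with one complete fold over enumerate(items) that keeps the first exact and first fallback index simultaneously, and builds the index lists from enumerate instead of range().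
import Mathlib
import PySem

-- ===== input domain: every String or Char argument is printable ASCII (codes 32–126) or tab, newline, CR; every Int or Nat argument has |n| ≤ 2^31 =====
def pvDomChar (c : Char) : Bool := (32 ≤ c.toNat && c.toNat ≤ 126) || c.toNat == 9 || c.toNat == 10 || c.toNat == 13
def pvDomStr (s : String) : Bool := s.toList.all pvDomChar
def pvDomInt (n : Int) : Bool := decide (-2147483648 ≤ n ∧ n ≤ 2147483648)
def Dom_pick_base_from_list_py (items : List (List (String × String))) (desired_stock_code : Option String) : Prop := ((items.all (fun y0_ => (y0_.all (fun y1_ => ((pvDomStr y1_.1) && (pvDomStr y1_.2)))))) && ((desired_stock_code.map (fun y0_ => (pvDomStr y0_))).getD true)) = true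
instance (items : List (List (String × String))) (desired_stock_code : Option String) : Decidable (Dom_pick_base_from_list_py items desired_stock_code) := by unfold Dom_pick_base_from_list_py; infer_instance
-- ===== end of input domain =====

-- B replaces A's two staged early-exit scans with one complete fold over enumerate(items)
-- keeping the first exact and first fallback index together; same return value, proved equal.


-- ===== PORT A =====
-- _is_dict: under the type convention every element is a typed dict, so isinstance is true
def pvIsDict (_it : List (String × String)) : Bool := true

-- A's first loop: first index with upper(stock_code) == upper(desired), early exit (break)
def pvFindExact (desired : String) : List (Int × List (String × String)) → Option Int
  | [] => none
  | (i, it) :: rest =>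
    if pvIsDict it && (PySem.Str.upper (PySem.Dict.getD (PySem.Dict.mk it) "stock_code" "") == PySem.Str.upper desired)
    then some i else pvFindExact desired rest

-- A's second loop: first index having 'stock_code' or 'instrument_token', early exit (break)
def pvFindFallback : List (Int × List (String × String)) → Option Int
  | [] => none
  | (i, it) :: rest =>
    if pvIsDict it && (PySem.Dict.contains (PySem.Dict.mk it) "stock_code" || PySem.Dict.contains (PySem.Dict.mk it) "instrument_token")
    then some i else pvFindFallback rest

def pick_base_from_list_py (items : List (List (String × String))) (desired_stock_code : Option String) : (List (String × String)) × List Int :=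
  let idx1 : Option Int :=
    match desired_stock_code with
    | some s => if s ≠ "" then pvFindExact s (PySem.List.enumerate items) else none
    | none => none
  let idx : Option Int :=
    match idx1 with
    | some i => some i
    | none => pvFindFallback (PySem.List.enumerate items)
  match idx with
  | none => ([], PySem.List.pyRange 0 (items.length : Int) 1)
  | some i => (PySem.List.pyGetD items i [],
      (PySem.List.pyRange 0 (items.length : Int) 1).filter (fun j => j != i))

-- ===== PORT B =====
-- B's single fold step: flip each None slot to the current index when its test fires
def pvStep (want : Option String) (st : Option Int × Option Int) (p : Int × List (String × String)) : Option Int × Option Int :=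
  (if st.1.isNone &&
      (match want with
       | some w => pvIsDict p.2 && (PySem.Str.upper (PySem.Dict.getD (PySem.Dict.mk p.2) "stock_code" "") == w)
       | none => false)
   then some p.1 else st.1,
   if st.2.isNone && (pvIsDict p.2 && (PySem.Dict.contains (PySem.Dict.mk p.2) "stock_code" || PySem.Dict.contains (PySem.Dict.mk p.2) "instrument_token"))
   then some p.1 else st.2)

def pick_base_from_list_py_alt (items : List (List (String × String))) (desired_stock_code : Option String) : (List (String × String)) × List Int :=
  let want : Option String :=
    match desired_stock_code with
    | some s => if s = "" then none else some (PySem.Str.upper s)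
    | none => none
  let st := (PySem.List.enumerate items).foldl (pvStep want) (none, none)
  let idx : Option Int := match st.1 with | none => st.2 | some j => some j
  match idx with
  | none => ([], (PySem.List.enumerate items).map (·.1))
  | some i => (PySem.List.pyGetD items i [],
      ((PySem.List.enumerate items).filter (fun p => p.1 != i)).map (·.1))

-- ===== PRECONDITION & SPEC =====
def Spec_pick_base_from_list_py (items : List (List (String × String))) (desired_stock_code : Option String) (out : (List (String × String)) × List Int) : Prop := out = pick_base_from_list_py_alt items desired_stock_code
instance (items : List (List (String × String))) (desired_stock_code : Option String) (out : (List (String × String)) × List Int) : Decidable (Spec_pick_base_from_list_py items desired_stock_code out) := by unfold Spec_pick_base_from_list_py; infer_instance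

-- ===== CLAIM (what is proved, stated in full; the proofs are below) =====
def Claim_equal_pick_base_from_list_py : Prop := ∀ (items : List (List (String × String))) (desired_stock_code : Option String), Dom_pick_base_from_list_py items desired_stock_code → Spec_pick_base_from_list_py items desired_stock_code (pick_base_from_list_py items desired_stock_code)

-- ===== LEMMAS AND PROOFS =====
-- the fold computes (first exact, first fallback): seeded with (ex, fb) it yields
-- (ex.or (exact scan), fb.or (fallback scan))
theorem pvFold_some (s : String) (ex fb : Option Int) (l : List (Int × List (String × String))) :
    l.foldl (pvStep (some (PySem.Str.upper s))) (ex, fb) =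
      (ex.or (pvFindExact s l), fb.or (pvFindFallback l)) := by
  induction l generalizing ex fb with
  | nil => cases ex <;> cases fb <;> simp [pvFindExact, pvFindFallback]
  | cons p rest ih =>
    obtain ⟨i, it⟩ := p
    simp only [List.foldl_cons, pvStep, pvFindExact, pvFindFallback, ih]
    cases ex <;> cases fb <;> split_ifs <;> simp_all [pvIsDict]

theorem pvFold_none (ex fb : Option Int) (l : List (Int × List (String × String))) :
    l.foldl (pvStep none) (ex, fb) = (ex, fb.or (pvFindFallback l)) := by
  induction l generalizing ex fb with
  | nil => cases fb <;> simp [pvFindFallback]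
  | cons p rest ih =>
    obtain ⟨i, it⟩ := p
    simp only [List.foldl_cons, pvStep, pvFindFallback, ih]
    cases fb <;> split_ifs <;> simp_all [pvIsDict]

-- B's enumerate-built index lists are A's range-built ones
theorem pvMapFst (items : List (List (String × String))) :
    (PySem.List.enumerate items).map (·.1) = PySem.List.pyRange 0 (items.length : Int) 1 := by
  simpa using PySem.List.map_fst_enumerate items 0

theorem pvFilterMapFst (items : List (List (String × String))) (i : Int) :
    ((PySem.List.enumerate items).filter (fun p => p.1 != i)).map (·.1) =
      (PySem.List.pyRange 0 (items.length : Int) 1).filter (fun j => j != i) := by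
  rw [← pvMapFst, List.filter_map]
  rfl

-- ===== VERDICT (by name: the statement is the Claim_ definition above) =====
theorem pick_base_from_list_py_spec : Claim_equal_pick_base_from_list_py := by
  intro items desired _hdom
  unfold Spec_pick_base_from_list_py pick_base_from_list_py pick_base_from_list_py_alt
  cases desired with
  | none =>
    simp only [pvFold_none, Option.none_or]
    cases pvFindFallback (PySem.List.enumerate items) <;>
      simp [pvMapFst, pvFilterMapFst]
  | some s =>
    by_cases hs : s = ""
    · subst hs
      simp only [ne_eq, not_true_eq_false, if_false, if_true, pvFold_none,
        Option.none_or]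
      cases pvFindFallback (PySem.List.enumerate items) <;>
        simp [pvMapFst, pvFilterMapFst]
    · simp only [ne_eq, hs, not_false_eq_true, if_true, if_false, pvFold_some,
        Option.none_or]
      cases hx : pvFindExact s (PySem.List.enumerate items) with
      | some i => simp [pvFilterMapFst]
      | none =>
        cases pvFindFallback (PySem.List.enumerate items) <;>
          simp [pvMapFst, pvFilterMapFst]
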